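/- GENERATED by tools/from_farm_form.py from prooffarm-gif/accepted/DGifCloseFile.3/Proof.lean (a worked proof of the farm's unit `DGifCloseFile.3`,
   accepted by the verdict) — do not edit. -/
import Gif.Spec.Units.DGifCloseFile_3
import Gif.Spec.AllSegs
import Gif.Spec.Proved.DGifCloseFile_3_Lemmas

open X86 X86.User Asan ProgX.Base ProgX.Base.Spec Gif.Spec

/-!
  `DGifCloseFile.3` (0x109cdd … 0x109d06, 10 instructions; dgif_lib.c:700-702): `if (GifFile->SavedImages) { GifFreeSavedImages(GifFile);
  GifFile->SavedImages = NULL; }` inside the unprotected function `DGifCloseFile`. The call's return address 0x109cf5 (`ret9`) is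
  made a cut of the unit's own, with the design's assertion `Closing` at that label; the two walks are in Lemmas.lean and are
  chained here.
-/

/-- Segment 3 of `DGifCloseFile` takes `Ok` (for `noMaps F`) at 0x109cdd to `Closing` (for `noSaved F`) at 0x109d06. -/
theorem Gif.Spec.Proved.DGifCloseFile_3_ok : Gif.Spec.DGifCloseFile_3.Statement := by
  unfold Gif.Spec.DGifCloseFile_3.Statement
  intro Lay hLay μ hμ u₀ hcode h_asan_load8_noabort h_GifFreeSavedImages h_asan_store8_noabort
  intro H rest frames F R Hc e ret v hat
  -- the callee's contract at the PRESENT heap, for the forest without the two colour maps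
  have hfree := h_GifFreeSavedImages Hc rest frames (Gif.Spec.DGifCloseFile.noMaps F) R
  -- 0x109cdd … 0x109d06 (gif.SavedImages = NULL) or … the call … 0x109cf5 (ret9)
  refine (Gif.Spec.DGifCloseFile_3.cf3_seg_call Lay hLay μ hμ u₀ hcode h_asan_load8_noabort H rest frames F R Hc e ret hfree v
    hat).trans ?_
  intro v1 hv1
  obtain ⟨H1, hexit | hret9⟩ := hv1
  · -- 0x109d06 reached directly: nothing was freed
    exact ReachVia.done ⟨H1, hexit⟩
  · -- 0x109cf5 … 0x109d06: the checked store of NULL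
    refine (Gif.Spec.DGifCloseFile_3.cf3_seg_store Lay hLay μ hμ u₀ hcode h_asan_store8_noabort H rest frames F R H1 e ret v1
      hret9).mono ?_
    intro w hw
    exact ⟨H1, hw⟩
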